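-- pv_equiv track=rewrite | github.com/vincenteichhorn/cs-search-engine-architecture | sea/query.py | _remove_consecutive_operators
-- ===== SOURCE A (Python) =====
-- from typing import List, Union
--
-- def _remove_consecutive_operators(tokens: List[str]) -> List[str]:
--     """
--     Remove consecutive operators from the token list.
--
--     Args:
--         tokens (List[str]): A list of tokens representing the query.
--     Returns:
--         List[str]: A list of tokens with consecutive operators removed.
--     """
--     if not tokens:
--         return tokens
--
--     cleaned_tokens = [tokens[0]]
--     operators = {"and", "or"}
--
--     for token in tokens[1:]:
--         if token in operators and cleaned_tokens[-1] in operators: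
--             continue
--         cleaned_tokens.append(token)
--
--     return cleaned_tokens
-- ===== SOURCE B (Python) =====
-- from typing import List
--
--
-- def _remove_consecutive_operators(tokens: List[str]) -> List[str]:
--     # A token is removed exactly when it and its original predecessor are both
--     # operators (the operator-ness of the last kept token always equals that of
--     # the original predecessor), so a stateless adjacent-pair filter suffices.
--     operators = {"and", "or"}
--     if not tokens:
--         return tokens
--     return tokens[:1] + [
--         cur for prev, cur in zip(tokens, tokens[1:])
--         if not (cur in operators and prev in operators)
--     ]
-- ===== Notes on version B (the rewrite author's own statement) =====
-- stated objective: alternative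
-- what changed: B replaces A's stateful accumulation (which inspects the last appended token) by a stateless filter over adjacent pairs of the original list, using the invariant that the last kept token is an operator iff the original predecessor is.
import Mathlib
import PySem

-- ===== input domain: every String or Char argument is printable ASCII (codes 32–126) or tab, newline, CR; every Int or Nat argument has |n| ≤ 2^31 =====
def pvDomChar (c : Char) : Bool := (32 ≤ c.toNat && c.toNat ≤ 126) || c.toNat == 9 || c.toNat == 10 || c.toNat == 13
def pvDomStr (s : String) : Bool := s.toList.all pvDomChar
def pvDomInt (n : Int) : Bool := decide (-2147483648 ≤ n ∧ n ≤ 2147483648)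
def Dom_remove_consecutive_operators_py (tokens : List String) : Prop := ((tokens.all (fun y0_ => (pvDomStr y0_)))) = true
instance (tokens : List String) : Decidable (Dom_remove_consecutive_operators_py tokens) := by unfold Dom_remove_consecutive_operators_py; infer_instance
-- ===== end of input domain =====

-- B replaces A's stateful accumulation by a stateless filter over adjacent pairs of the original list; return values only.

-- membership test `t in {"and","or"}`
def pvIsOp (t : String) : Bool := t == "and" || t == "or"

-- ===== PORT A =====
-- A's loop body: skip token if it and the last appended token are operators, else append.
def pvStepA (acc : List String) (token : String) : List String :=
  if pvIsOp token && (acc.getLast?).elim false pvIsOp then acc else acc ++ [token]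

def remove_consecutive_operators_py (tokens : List String) : List String :=
  match tokens with
  | [] => tokens
  | t0 :: rest => rest.foldl pvStepA [t0]

-- ===== PORT B =====
-- tokens[:1] + [cur for prev, cur in zip(tokens, tokens[1:]) if not (cur in ops and prev in ops)]
def remove_consecutive_operators_py_alt (tokens : List String) : List String :=
  match tokens with
  | [] => tokens
  | _ :: tl =>
    tokens.take 1 ++
      ((tokens.zip tl).filter (fun pc => !(pvIsOp pc.2 && pvIsOp pc.1))).map Prod.snd

-- ===== PRECONDITION & SPEC =====
def Spec_remove_consecutive_operators_py (tokens : List String) (out : List String) : Prop := out = remove_consecutive_operators_py_alt tokens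
instance (tokens : List String) (out : List String) : Decidable (Spec_remove_consecutive_operators_py tokens out) := by unfold Spec_remove_consecutive_operators_py; infer_instance

-- ===== CLAIM =====
def Claim_equal_remove_consecutive_operators_py : Prop := ∀ (tokens : List String), Dom_remove_consecutive_operators_py tokens → Spec_remove_consecutive_operators_py tokens (remove_consecutive_operators_py tokens)

-- ===== LEMMAS AND PROOFS =====

-- B's filter, written as a recursion carrying the original previous token
def pvPairF (p : String) (ts : List String) : List String :=
  match ts with
  | [] => []
  | t :: r => (if pvIsOp t && pvIsOp p then [] else [t]) ++ pvPairF t r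

theorem pairF_eq_filter (ts : List String) : ∀ (p : String),
    (((p :: ts).zip ts).filter (fun pc => !(pvIsOp pc.2 && pvIsOp pc.1))).map Prod.snd
      = pvPairF p ts := by
  induction ts with
  | nil => intro p; simp [pvPairF]
  | cons t r ih =>
    intro p
    have ih' := ih t
    simp only [Bool.not_and] at ih'
    by_cases h : (pvIsOp t && pvIsOp p) = true
    · obtain ⟨h1, h2⟩ := (Bool.and_eq_true _ _).mp h
      simp [pvPairF, h1, h2, ih']
    · have hb : (!pvIsOp t || !pvIsOp p) = true := by
        rw [← Bool.not_and]; simp [h]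
      rw [Bool.and_eq_true] at h
      simp [pvPairF, hb, ih', h]

theorem foldl_stepA (rest : List String) : ∀ (acc : List String) (l p : String),
    acc.getLast? = some l → pvIsOp l = pvIsOp p →
    rest.foldl pvStepA acc = acc ++ pvPairF p rest := by
  induction rest with
  | nil => intro acc l p _ _; simp [pvPairF]
  | cons t r ih =>
    intro acc l p hl hlp
    by_cases h : (pvIsOp t && pvIsOp p) = true
    · obtain ⟨ht, hp⟩ := (Bool.and_eq_true _ _).mp h
      have hskip : pvStepA acc t = acc := by
        simp [pvStepA, hl, ht, hlp.trans hp]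
      have : r.foldl pvStepA acc = acc ++ pvPairF t r :=
        ih acc l t hl (by rw [hlp, hp, ht])
      simp [hskip, this, pvPairF, h]
    · have hkeep : pvStepA acc t = acc ++ [t] := by
        simp only [pvStepA, hl, Option.elim]
        rw [if_neg]
        intro hc
        exact h (by rw [Bool.and_eq_true] at hc ⊢; exact ⟨hc.1, hlp ▸ hc.2⟩)
      have hlast : (acc ++ [t]).getLast? = some t := by simp
      have : r.foldl pvStepA (acc ++ [t]) = (acc ++ [t]) ++ pvPairF t r :=
        ih (acc ++ [t]) t t hlast rfl
      simp [hkeep, this, pvPairF, h]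

-- ===== VERDICT =====
theorem remove_consecutive_operators_py_spec : Claim_equal_remove_consecutive_operators_py := by
  intro tokens _
  unfold Spec_remove_consecutive_operators_py
  match tokens with
  | [] => rfl
  | t0 :: rest =>
    simp only [remove_consecutive_operators_py, remove_consecutive_operators_py_alt,
      List.take, pairF_eq_filter]
    rw [foldl_stepA rest [t0] t0 t0 (by simp) rfl]
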